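-- pv_equiv track=rewrite | github.com/mortyc126-debug/SHA | alg_attack/carry_cancel_attack.py | find_carry_cancel_deltas
-- ===== SOURCE A (Python) =====
-- def carry_chain(a, b):
--     c = 0
--     result = 0
--     for i in range(32):
--         ai, bi = (a >> i) & 1, (b >> i) & 1
--         s = ai + bi + c
--         c = 1 if s >= 2 else 0
--         result |= (c << i)
--     return result
--
-- def carry_weight(a, b):
--     return bin(carry_chain(a, b)).count('1')
--
-- def find_carry_cancel_deltas(K_val, W_val, top_n=20):
--     """
--     Find δ values that minimize carry difference in K + W vs K + (W^δ).
--     These are the ALG-optimal message differences.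
--     """
--     base_carry = carry_weight(K_val, W_val)
--     results = []
--
--     for delta in range(1, 2048):  # search low-weight deltas
--         new_W = W_val ^ delta
--         new_carry = carry_weight(K_val, new_W)
--         carry_diff = abs(new_carry - base_carry)
--
--         # Also measure total carry change through the full T1 path
--         # Lower carry_diff = more cancellation = better differential
--         results.append((carry_diff, bin(delta).count('1'), delta))
--
--     results.sort()
--     return results[:top_n]
-- ===== SOURCE B (Python) =====
-- def _carries(a, b):
--     # all 32 carry-out bits of the 32-bit add a+b, computed in parallel:
--     # bit i of ((am ^ bm ^ (am+bm)) >> 1) is the carry out of bit i.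
--     am = a & 0xFFFFFFFF
--     bm = b & 0xFFFFFFFF
--     return (am ^ bm ^ (am + bm)) >> 1
--
--
-- def find_carry_cancel_deltas(K_val, W_val, top_n=20):
--     base_carry = _carries(K_val, W_val).bit_count()
--     rows = sorted((abs(_carries(K_val, W_val ^ delta).bit_count() - base_carry),
--                    delta.bit_count(), delta)
--                   for delta in range(1, 2048))
--     return rows[:top_n]
-- ===== Notes on version B (the rewrite author's own statement) =====
-- stated objective: faster
-- what changed: B replaces A's 32-iteration ripple-carry loop (one carry bit per pass) by a closed-form bit-parallel formula ((a&M ^ b&M ^ ((a&M)+(b&M))) >> 1) that yields all 32 carry-out bits in one arithmetic expression, replaces bin(x).count('1') by int.bit_count(), and builds the rows with a sorted() generator expression instead of an append loop.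
import Mathlib
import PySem

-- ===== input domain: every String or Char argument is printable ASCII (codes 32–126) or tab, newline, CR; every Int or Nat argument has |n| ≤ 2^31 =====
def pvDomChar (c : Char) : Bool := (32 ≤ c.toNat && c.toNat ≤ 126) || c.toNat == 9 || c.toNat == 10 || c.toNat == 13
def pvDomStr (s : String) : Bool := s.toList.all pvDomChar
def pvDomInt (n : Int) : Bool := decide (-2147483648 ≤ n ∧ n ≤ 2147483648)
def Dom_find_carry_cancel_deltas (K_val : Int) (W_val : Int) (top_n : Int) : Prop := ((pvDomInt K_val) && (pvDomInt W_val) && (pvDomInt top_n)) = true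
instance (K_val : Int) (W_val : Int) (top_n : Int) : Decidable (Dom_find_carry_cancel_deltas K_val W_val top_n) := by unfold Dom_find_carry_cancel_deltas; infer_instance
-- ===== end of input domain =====

-- B replaces A's 32-step ripple-carry loop by a closed-form parallel carry computation
-- ((am^bm^(am+bm))>>1) and bin(x).count('1') by int.bit_count(); objective: faster (constant factor).

-- ===== PORT A =====
-- for i in range(32): s = ((a>>i)&1) + ((b>>i)&1) + c; c = 1 if s >= 2 else 0; result |= c << i
def carry_chain (a : Int) (b : Int) : Int :=
  ((PySem.List.pyRange 0 32 1).foldl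
    (fun (st : Int × Int) (i : Int) =>
      let ai := PySem.Int.band (a >>> i.toNat) 1
      let bi := PySem.Int.band (b >>> i.toNat) 1
      let s := ai + bi + st.1
      let c : Int := if 2 ≤ s then 1 else 0
      (c, PySem.Int.bor st.2 (c <<< i.toNat)))
    (0, 0)).2

def carry_weight (a : Int) (b : Int) : Int :=
  (PySem.Str.count (PySem.Int.pyBin (carry_chain a b)) "1" : Int)

-- results.sort() is Python's stable lexicographic sort of (diff, weight, delta) triples; the
-- third components are pairwise distinct and strictly increasing in build order, so the stable
-- two-key tuple sort PySem.List.sorted2 (diff, weight) computes exactly the same list.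
def find_carry_cancel_deltas (K_val : Int) (W_val : Int) (top_n : Int) : List (Int × Int × Int) :=
  let base_carry := carry_weight K_val W_val
  let results := (PySem.List.pyRange 1 2048 1).foldl
    (fun (acc : List (Int × Int × Int)) (delta : Int) =>
      let new_W := PySem.Int.bxor W_val delta
      let new_carry := carry_weight K_val new_W
      let carry_diff := |new_carry - base_carry|
      acc ++ [(carry_diff, (PySem.Str.count (PySem.Int.pyBin delta) "1" : Int), delta)])
    []
  PySem.List.slice (PySem.List.sorted2 results (fun t => t.1) (fun t => t.2.1)) none (some top_n)

-- ===== PORT B =====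
-- (am ^ bm ^ (am+bm)) >> 1 : all 32 carry-out bits of the 32-bit add, computed in parallel
def pvCarries (a : Int) (b : Int) : Int :=
  let am := PySem.Int.band a 4294967295
  let bm := PySem.Int.band b 4294967295
  (PySem.Int.bxor (PySem.Int.bxor am bm) (am + bm)) >>> (1 : Nat)

def find_carry_cancel_deltas_alt (K_val : Int) (W_val : Int) (top_n : Int) : List (Int × Int × Int) :=
  let base_carry := (PySem.Int.bitCount (pvCarries K_val W_val) : Int)
  let rows := PySem.List.sorted2
    ((PySem.List.pyRange 1 2048 1).map (fun (delta : Int) =>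
      (|(PySem.Int.bitCount (pvCarries K_val (PySem.Int.bxor W_val delta)) : Int) - base_carry|,
       (PySem.Int.bitCount delta : Int), delta)))
    (fun t => t.1) (fun t => t.2.1)
  PySem.List.slice rows none (some top_n)

-- ===== PRECONDITION & SPEC =====
def Spec_find_carry_cancel_deltas (K_val : Int) (W_val : Int) (top_n : Int) (out : List (Int × Int × Int)) : Prop := out = find_carry_cancel_deltas_alt K_val W_val top_n
instance (K_val : Int) (W_val : Int) (top_n : Int) (out : List (Int × Int × Int)) : Decidable (Spec_find_carry_cancel_deltas K_val W_val top_n out) := by unfold Spec_find_carry_cancel_deltas; infer_instance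

-- ===== CLAIM (what is proved, stated in full; the proofs are below) =====
def Claim_equal_find_carry_cancel_deltas : Prop := ∀ (K_val : Int) (W_val : Int) (top_n : Int), Dom_find_carry_cancel_deltas K_val W_val top_n → Spec_find_carry_cancel_deltas K_val W_val top_n (find_carry_cancel_deltas K_val W_val top_n)

-- ===== LEMMAS AND PROOFS =====

-- carry into bit n of the 32-bit add am + bm
def pvC (am bm : Nat) (n : Nat) : Nat := (am % 2^n + bm % 2^n) / 2^n

-- accumulated result of A's loop after n iterations: carry-out bits of positions 0..n-1
def pvR (am bm : Nat) : Nat → Nat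
  | 0 => 0
  | n+1 => pvR am bm n + pvC am bm (n+1) * 2^n

theorem pvC_le_one (am bm n : Nat) : pvC am bm n ≤ 1 := by
  have h : am % 2^n + bm % 2^n < 2 * 2^n := by
    have h1 := Nat.mod_lt am (y := 2^n) (by positivity)
    have h2 := Nat.mod_lt bm (y := 2^n) (by positivity)
    omega
  unfold pvC
  have h3 : (am % 2^n + bm % 2^n) / 2^n < 2 :=
    (Nat.div_lt_iff_lt_mul (by positivity)).mpr (by omega)
  omega

theorem pvR_lt (am bm n : Nat) : pvR am bm n < 2^n := by
  induction n with
  | zero => simp [pvR]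
  | succ n ih =>
    have h := pvC_le_one am bm (n+1)
    have : pvR am bm (n+1) = pvR am bm n + pvC am bm (n+1) * 2^n := rfl
    have hp : (2:Nat)^(n+1) = 2^n + 2^n := by ring
    nlinarith [Nat.mul_le_mul_right (2^n) h]

theorem pvC_step (am bm n : Nat) :
    pvC am bm (n+1) = (am / 2^n % 2 + bm / 2^n % 2 + pvC am bm n) / 2 := by
  have hP : (0:Nat) < 2^n := by positivity
  have hma : am % 2^(n+1) = am % 2^n + 2^n * (am / 2^n % 2) := by
    conv_lhs => rw [pow_succ, Nat.mod_mul]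
  have hmb : bm % 2^(n+1) = bm % 2^n + 2^n * (bm / 2^n % 2) := by
    conv_lhs => rw [pow_succ, Nat.mod_mul]
  unfold pvC
  rw [hma, hmb]
  set ra := am % 2^n; set rb := bm % 2^n
  set xa := am / 2^n % 2; set xb := bm / 2^n % 2
  have h1 : ra + 2^n * xa + (rb + 2^n * xb) = (ra + rb) + 2^n * (xa + xb) := by ring
  rw [h1, pow_succ, ← Nat.div_div_eq_div_mul, Nat.add_mul_div_left _ _ hP]
  omega

theorem pv_div_sum (am bm i : Nat) : (am + bm) / 2^i = am / 2^i + bm / 2^i + pvC am bm i := by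
  have hP : (0:Nat) < 2^i := by positivity
  conv_lhs => rw [← Nat.div_add_mod am (2^i), ← Nat.div_add_mod bm (2^i)]
  have h1 : 2^i * (am / 2^i) + am % 2^i + (2^i * (bm / 2^i) + bm % 2^i)
      = (am % 2^i + bm % 2^i) + 2^i * (am / 2^i + bm / 2^i) := by ring
  rw [h1, Nat.add_mul_div_left _ _ hP]
  unfold pvC; omega

theorem pvR_testBit (am bm : Nat) : ∀ n j, (pvR am bm n).testBit j =
    (decide (j < n) && decide (pvC am bm (j+1) = 1)) := by
  intro n
  induction n with
  | zero => intro j; simp [pvR]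
  | succ n ih =>
    intro j
    have hc := pvC_le_one am bm (n+1)
    have hR := pvR_lt am bm n
    show (pvR am bm n + pvC am bm (n+1) * 2^n).testBit j = _
    interval_cases h : pvC am bm (n+1)
    · simp only [Nat.zero_mul, Nat.add_zero, ih j]
      rcases Nat.lt_trichotomy j n with hj | hj | hj
      · simp [hj, Nat.lt_succ_of_lt hj]
      · subst hj
        simp [h]
      · simp [Nat.not_lt.mpr (Nat.le_of_lt hj), Nat.not_lt.mpr hj]
    · have hor : pvR am bm n + 1 * 2^n = 2^n * 1 ||| pvR am bm n := by
        rw [← Nat.two_pow_add_eq_or_of_lt hR 1]; ring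
      rw [hor]
      rcases Nat.lt_trichotomy j n with hj | hj | hj
      · simp [Nat.testBit_or, ih j, hj, Nat.lt_succ_of_lt hj, Nat.ne_of_gt hj]
      · subst hj
        simp [Nat.testBit_or, h]
      · have hne : n ≠ j := by omega
        have hRj : (pvR am bm n).testBit j = false :=
          Nat.testBit_lt_two_pow (lt_of_lt_of_le hR (Nat.pow_le_pow_right (by norm_num) (le_of_lt hj)))
        simp [Nat.testBit_or, hne, hRj, Nat.not_lt.mpr hj]

theorem pv_bool_bit (qa qb c : Nat) (hc : c ≤ 1) :
    ((decide (qa % 2 = 1) ^^ decide (qb % 2 = 1)) ^^ decide ((qa + qb + c) % 2 = 1))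
      = decide (c = 1) := by
  have hs : (qa + qb + c) % 2 = (qa % 2 + qb % 2 + c) % 2 := by omega
  rcases Nat.mod_two_eq_zero_or_one qa with h1 | h1 <;>
    rcases Nat.mod_two_eq_zero_or_one qb with h2 | h2 <;>
      interval_cases c <;> simp [hs, h1, h2] <;> omega

theorem pvR_closed (am bm : Nat) (ha : am < 2^32) (hb : bm < 2^32) :
    pvR am bm 32 = ((am ^^^ bm) ^^^ (am + bm)) >>> 1 := by
  apply Nat.eq_of_testBit_eq
  intro j
  rw [pvR_testBit, Nat.testBit_shiftRight, Nat.testBit_xor, Nat.testBit_xor]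
  by_cases hj : j < 32
  · have hsum : Nat.testBit (am + bm) (1 + j) =
        decide ((am / 2^(1+j) + bm / 2^(1+j) + pvC am bm (1+j)) % 2 = 1) := by
      rw [Nat.testBit_eq_decide_div_mod_eq, pv_div_sum]
    rw [hsum, Nat.testBit_eq_decide_div_mod_eq, Nat.testBit_eq_decide_div_mod_eq,
      pv_bool_bit _ _ _ (pvC_le_one am bm (1+j))]
    have h1j : 1 + j = j + 1 := by omega
    simp [hj, h1j]
  · have hpow : (2:Nat)^33 ≤ 2^(1+j) := Nat.pow_le_pow_right (by norm_num) (by omega)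
    have p1 : am.testBit (1+j) = false :=
      Nat.testBit_lt_two_pow (lt_of_lt_of_le (by omega : am < 2^33) hpow)
    have p2 : bm.testBit (1+j) = false :=
      Nat.testBit_lt_two_pow (lt_of_lt_of_le (by omega : bm < 2^33) hpow)
    have p3 : (am + bm).testBit (1+j) = false :=
      Nat.testBit_lt_two_pow (lt_of_lt_of_le (by omega : am + bm < 2^33) hpow)
    simp [p1, p2, p3, hj]

theorem pv_band_mask (a : Int) : PySem.Int.band a 4294967295 = a % 4294967296 := by
  have h32 : (2:Nat)^32 = 4294967296 := by norm_num
  unfold PySem.Int.band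
  by_cases h : 0 ≤ a
  · simp only [h, if_true, if_pos (by norm_num : (0:Int) ≤ 4294967295)]
    rw [show ((4294967295:Int).toNat) = 2^32 - 1 by rfl,
      Nat.and_two_pow_sub_one_eq_mod, h32]
    obtain ⟨m, rfl⟩ := Int.eq_ofNat_of_zero_le h
    simp only [Int.toNat_natCast]
    omega
  · simp only [h, if_false, if_pos (by norm_num : (0:Int) ≤ 4294967295)]
    rw [show ((4294967295:Int).toNat) = 2^32 - 1 by rfl, Nat.and_comm,
      Nat.and_two_pow_sub_one_eq_mod, h32]
    have hk : ((-a - 1).toNat : Int) = -a - 1 := by omega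
    omega

theorem pv_bit (a : Int) (n : Nat) (hn : n < 32) :
    PySem.Int.band (a >>> n) 1 = (((a % 4294967296).toNat / 2^n % 2 : Nat) : Int) := by
  rw [PySem.Int.band_one, PySem.Int.mod_eq_emod_of_pos (by norm_num)]
  rw [Int.shiftRight_eq_div_pow,
    show ((2^n : Nat) : Int) = (2:Int)^n by push_cast; ring]
  have hm : ((a % 4294967296).toNat : Int) = a % 4294967296 := by
    have := Int.emod_nonneg a (by norm_num : (4294967296:Int) ≠ 0)
    omega
  set r : Int := a % 4294967296 with hr
  have ha : a = 4294967296 * (a / 4294967296) + r := by omega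
  set q : Int := a / 4294967296 with hq
  have hpow : (2:Int)^(32-n) * 2^n = 4294967296 := by
    rw [← pow_add, show 32 - n + n = 32 by omega]
    norm_num
  have hstep : a / (2^n : Int) = r / 2^n + q * 2^(32-n) := by
    calc a / (2^n : Int) = (r + q * 2^(32-n) * 2^n) / 2^n := by
          rw [mul_assoc, hpow]; congr 1; omega
      _ = r / 2^n + q * 2^(32-n) := Int.add_mul_ediv_right _ _ (by positivity)
  have h2 : (2:Int)^(32-n) = 2 * 2^(31-n) := by
    rw [← pow_succ', show 31 - n + 1 = 32 - n by omega]
  rw [hstep]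
  have : (r / 2^n + q * 2^(32-n)) % 2 = (r / 2^n) % 2 := by
    rw [h2]
    have h3 : q * (2 * 2^(31-n)) = q * 2^(31-n) * 2 := by ring
    rw [h3, Int.add_mul_emod_self_right]
  rw [this]
  rw [← hm]
  push_cast
  rw [Int.toNat_natCast]

theorem pv_fold (a b : Int) (n : Nat) (hn : n ≤ 32) :
    (PySem.List.pyRange 0 (n : Int) 1).foldl
      (fun (st : Int × Int) (i : Int) =>
        let ai := PySem.Int.band (a >>> i.toNat) 1
        let bi := PySem.Int.band (b >>> i.toNat) 1
        let s := ai + bi + st.1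
        let c : Int := if 2 ≤ s then 1 else 0
        (c, PySem.Int.bor st.2 (c <<< i.toNat)))
      (0, 0)
    = (((pvC (a % 4294967296).toNat (b % 4294967296).toNat n : Nat) : Int),
       ((pvR (a % 4294967296).toNat (b % 4294967296).toNat n : Nat) : Int)) := by
  set am := (a % 4294967296).toNat with ham
  set bm := (b % 4294967296).toNat with hbm
  induction n with
  | zero =>
    simp only [Nat.cast_zero]
    rw [PySem.List.pyRange_one_eq_nil (le_refl (0:Int))]
    simp [pvC, pvR]
  | succ n ih =>
    have hn' : n ≤ 32 := by omega
    have hlt : n < 32 := by omega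
    have hcast : ((n+1 : Nat) : Int) = (n : Int) + 1 := by push_cast; ring
    rw [hcast, PySem.List.pyRange_one_succ_right (Int.natCast_nonneg n), List.foldl_append,
      ih hn']
    simp only [List.foldl_cons, List.foldl_nil, Int.toNat_natCast]
    simp only [pv_bit a n hlt, pv_bit b n hlt]
    rw [← ham, ← hbm]
    set xa := am / 2^n % 2 with hxa
    set xb := bm / 2^n % 2 with hxb
    have hxa1 : xa ≤ 1 := by omega
    have hxb1 : xb ≤ 1 := by omega
    have hc1 : pvC am bm n ≤ 1 := pvC_le_one am bm n
    have hstep : pvC am bm (n+1) = (xa + xb + pvC am bm n) / 2 := pvC_step am bm n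
    have hc : (if (2:Int) ≤ (xa : Int) + (xb : Int) + (pvC am bm n : Nat) then (1:Int) else 0)
        = ((pvC am bm (n+1) : Nat) : Int) := by
      split_ifs with h
      · rw [hstep]
        push_cast at h ⊢
        omega
      · rw [hstep]
        push_cast at h ⊢
        omega
    rw [hc]
    refine Prod.ext rfl ?_
    show PySem.Int.bor ((pvR am bm n : Nat) : Int) (((pvC am bm (n+1) : Nat) : Int) <<< n)
        = ((pvR am bm (n+1) : Nat) : Int)
    rw [← Int.natCast_shiftLeft, PySem.Int.bor_natCast]
    have hR := pvR_lt am bm n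
    have hRd : pvR am bm (n+1) = pvR am bm n + pvC am bm (n+1) * 2^n := rfl
    congr 1
    rw [Nat.shiftLeft_eq, hRd]
    rcases Nat.le_one_iff_eq_zero_or_eq_one.mp (pvC_le_one am bm (n+1)) with h0 | h1
    · simp [h0]
    · have h := Nat.two_pow_add_eq_or_of_lt hR 1
      rw [mul_one] at h
      rw [h1, one_mul, Nat.or_comm, ← h]
      exact Nat.add_comm _ _


theorem pvCarries_natCast (a b : Int) : pvCarries a b =
    (((((a % 4294967296).toNat ^^^ (b % 4294967296).toNat) ^^^
       ((a % 4294967296).toNat + (b % 4294967296).toNat)) >>> 1 : Nat) : Int) := by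
  set na := (a % 4294967296).toNat with hna
  set nb := (b % 4294967296).toNat with hnb
  have hm : ((na : Nat) : Int) = a % 4294967296 := by omega
  have hm' : ((nb : Nat) : Int) = b % 4294967296 := by omega
  simp only [pvCarries]
  rw [pv_band_mask, pv_band_mask, ← hm, ← hm', PySem.Int.bxor_natCast]
  rw [show ((na:Int) + (nb:Int) = ((na + nb : Nat):Int)) by push_cast; ring]
  rw [PySem.Int.bxor_natCast, ← Int.natCast_shiftRight]

theorem pv_carry_chain_eq (a b : Int) : carry_chain a b = pvCarries a b := by
  set na := (a % 4294967296).toNat with hna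
  set nb := (b % 4294967296).toNat with hnb
  have ha32 : na < 2^32 := by norm_num; omega
  have hb32 : nb < 2^32 := by norm_num; omega
  rw [pvCarries_natCast]
  unfold carry_chain
  rw [show (32:Int) = ((32:Nat):Int) by norm_num, pv_fold a b 32 (le_refl 32)]
  rw [← hna, ← hnb, pvR_closed na nb ha32 hb32]

theorem pv_go_count : ∀ (fuel : Nat) (l : List Char) (acc : Nat), l.length ≤ fuel →
    PySem.Chars.count.go ['1'] fuel l acc = acc + l.count '1' := by
  intro fuel
  induction fuel with
  | zero =>
    intro l acc h
    have : l = [] := by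
      cases l with
      | nil => rfl
      | cons x t => simp at h
    subst this
    simp [PySem.Chars.count.go]
  | succ f ih =>
    intro l acc h
    cases l with
    | nil => simp [PySem.Chars.count.go]
    | cons x t =>
      rw [PySem.Chars.count.go]
      by_cases hx : x = '1'
      · subst hx
        have hpre : List.isPrefixOf ['1'] ('1' :: t) = true := by
          simp [List.isPrefixOf]
        rw [if_pos hpre]
        simp only [List.length_cons] at h
        rw [show (List.drop (List.length ['1']) ('1' :: t)) = t by simp]
        rw [ih t (acc+1) (by omega)]
        rw [List.count_cons]
        simp
        try omega
      · have hpre : List.isPrefixOf ['1'] (x :: t) = false := by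
          simp [List.isPrefixOf]
          exact fun hh => (hx hh.symm).elim
        rw [if_neg (by simp [hpre])]
        simp only [List.length_cons] at h
        rw [ih t acc (by omega)]
        rw [List.count_cons]
        simp [hx]

theorem pv_digits_count : ∀ (f n : Nat) (ds : List Char), n < f →
    (Nat.toDigitsCore 2 f n ds).count '1' = PySem.Int.bitCount (n : Int) + ds.count '1' := by
  intro f
  induction f with
  | zero => intro n ds h; omega
  | succ f ih =>
    intro n ds h
    rw [Nat.toDigitsCore]
    by_cases h2 : n / 2 = 0
    · rw [if_pos h2]
      have : n = 0 ∨ n = 1 := by omega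
      have hb0 : PySem.Int.bitCount (0 : Int) = 0 := by decide
      have hb1 : PySem.Int.bitCount (1 : Int) = 1 := by decide
      have hc0 : (Nat.digitChar (0 % 2) == '1') = false := by decide
      have hc1 : (Nat.digitChar (1 % 2) == '1') = true := by decide
      rcases this with h0 | h0 <;> subst h0 <;> rw [List.count_cons]
      · simp [hc0, hb0]
        try omega
      · simp [hc1, hb1]
        try omega
    · rw [if_neg h2]
      rw [ih (n/2) _ (by omega)]
      have hbc : PySem.Int.bitCount (n : Int) = n % 2 + PySem.Int.bitCount ((n/2 : Nat) : Int) :=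
        PySem.Int.bitCount_natCast (by omega)
      rw [hbc, List.count_cons]
      rcases Nat.mod_two_eq_zero_or_one n with hm | hm <;> rw [hm]
      · have hc : (Nat.digitChar 0 == '1') = false := by decide
        simp [hc]
        try omega
      · have hc : (Nat.digitChar 1 == '1') = true := by decide
        simp [hc]
        try omega

theorem pv_count_pyBin (n : Nat) :
    PySem.Str.count (PySem.Int.pyBin (n : Int)) "1" = PySem.Int.bitCount (n : Int) := by
  rw [PySem.Str.count_eq, PySem.Int.toList_pyBin]
  have hsub : ("1" : String).toList = ['1'] := by decide
  rw [hsub]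
  have hnn : ¬ ((n : Int) < 0) := by omega
  unfold PySem.Int.toBinChars0b
  rw [if_neg hnn]
  have htn : ((n : Int)).toNat = n := Int.toNat_natCast n
  rw [htn]
  unfold PySem.Chars.count
  rw [if_neg (by simp)]
  rw [pv_go_count _ _ _ (le_refl _)]
  have hd : Nat.toDigits 2 n = Nat.toDigitsCore 2 (n+1) n [] := rfl
  simp only [List.count_cons]
  rw [hd, pv_digits_count (n+1) n [] (by omega)]
  simp


theorem pv_carry_weight_eq (a b : Int) :
    carry_weight a b = (PySem.Int.bitCount (pvCarries a b) : Int) := by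
  unfold carry_weight
  rw [pv_carry_chain_eq, pvCarries_natCast, pv_count_pyBin, ← pvCarries_natCast]

set_option maxRecDepth 16384 in
theorem find_carry_cancel_deltas_spec' : ∀ (K_val : Int) (W_val : Int) (top_n : Int),
    find_carry_cancel_deltas K_val W_val top_n = find_carry_cancel_deltas_alt K_val W_val top_n := by
  intro K W t
  unfold find_carry_cancel_deltas find_carry_cancel_deltas_alt
  simp only [PySem.List.foldl_append_singleton_eq_map, List.nil_append, pv_carry_weight_eq]
  have hmap : List.map
      (fun x : Int =>
        ((|((PySem.Int.bitCount (pvCarries K (PySem.Int.bxor W x)) : Nat) : Int) - ((PySem.Int.bitCount (pvCarries K W) : Nat) : Int)|,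
          ((PySem.Str.count (PySem.Int.pyBin x) "1" : Nat) : Int), x) : Int × Int × Int))
      (PySem.List.pyRange 1 2048)
    = List.map
      (fun delta : Int =>
        ((|((PySem.Int.bitCount (pvCarries K (PySem.Int.bxor W delta)) : Nat) : Int) - ((PySem.Int.bitCount (pvCarries K W) : Nat) : Int)|,
          ((PySem.Int.bitCount delta : Nat) : Int), delta) : Int × Int × Int))
      (PySem.List.pyRange 1 2048) := by
    refine List.map_congr_left ?_
    intro d hd
    have hd1 := PySem.List.mem_pyRange_one.mp hd
    obtain ⟨m, rfl⟩ := Int.eq_ofNat_of_zero_le (by omega : (0:Int) ≤ d)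
    rw [pv_count_pyBin]
  rw [hmap]

-- ===== VERDICT (by name: the statement is the Claim_ definition above) =====
theorem find_carry_cancel_deltas_spec : Claim_equal_find_carry_cancel_deltas := by
  intro K_val W_val top_n _
  exact find_carry_cancel_deltas_spec' K_val W_val top_n
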